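-- pv_equiv track=rewrite | github.com/jclements3/trefoil | scripts/validate_hymnal.py | diatonic_span
-- ===== SOURCE A (Python) =====
-- NOTE_BASE = {"C": 0, "D": 2, "E": 4, "F": 5, "G": 7, "A": 9, "B": 11}
--
-- KEY_SIGS = {
--     "C": {}, "G": {"F": 1}, "D": {"F": 1, "C": 1}, "A": {"F": 1, "C": 1, "G": 1},
--     "E": {"F": 1, "C": 1, "G": 1, "D": 1}, "B": {"F": 1, "C": 1, "G": 1, "D": 1, "A": 1},
--     "F": {"B": -1}, "Bb": {"B": -1, "E": -1}, "Eb": {"B": -1, "E": -1, "A": -1},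
--     "Ab": {"B": -1, "E": -1, "A": -1, "D": -1},
--     "Db": {"B": -1, "E": -1, "A": -1, "D": -1, "G": -1},
-- }
--
-- def diatonic_span(midis, key_name):
--     """Count diatonic string span (inclusive) between lowest and highest MIDI."""
--     if len(midis) < 2:
--         return 0
--     lo, hi = min(midis), max(midis)
--     ks = KEY_SIGS.get(key_name, {})
--     diatonic_pcs = set()
--     for name, base in NOTE_BASE.items():
--         diatonic_pcs.add((base + ks.get(name, 0)) % 12)
--     return sum(1 for m in range(lo, hi + 1) if m % 12 in diatonic_pcs)
-- ===== SOURCE B (Python) =====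
-- # Precomputed diatonic pitch-class sets (mod 12) for each supported key;
-- # unknown keys fall back to C major, matching KEY_SIGS.get(key_name, {}).
-- _SCALE_PCS = {
--     "C":  [0, 2, 4, 5, 7, 9, 11],
--     "G":  [0, 2, 4, 6, 7, 9, 11],
--     "D":  [1, 2, 4, 6, 7, 9, 11],
--     "A":  [1, 2, 4, 6, 8, 9, 11],
--     "E":  [1, 3, 4, 6, 8, 9, 11],
--     "B":  [1, 3, 4, 6, 8, 10, 11],
--     "F":  [0, 2, 4, 5, 7, 9, 10],
--     "Bb": [0, 2, 3, 5, 7, 9, 10],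
--     "Eb": [0, 2, 3, 5, 7, 8, 10],
--     "Ab": [0, 1, 3, 5, 7, 8, 10],
--     "Db": [0, 1, 3, 5, 6, 8, 10],
-- }
--
-- def diatonic_span(midis, key_name):
--     """Count diatonic string span (inclusive) between lowest and highest MIDI."""
--     if len(midis) < 2:
--         return 0
--     lo, hi = min(midis), max(midis)
--     pcs = _SCALE_PCS.get(key_name, _SCALE_PCS["C"])
--     # closed form: #{m in [lo, hi] : m % 12 == r} = (hi-r)//12 - (lo-1-r)//12
--     return sum((hi - r) // 12 - (lo - 1 - r) // 12 for r in pcs)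
-- ===== Notes on version B (the rewrite author's own statement) =====
-- stated objective: faster
-- what changed: Replaces the per-note construction of the diatonic set and the per-semitone scan over range(lo, hi+1) with a precomputed scale table per key and a closed-form 7-term floor-division sum counting the members of each residue class mod 12 in [lo, hi].
import Mathlib
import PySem

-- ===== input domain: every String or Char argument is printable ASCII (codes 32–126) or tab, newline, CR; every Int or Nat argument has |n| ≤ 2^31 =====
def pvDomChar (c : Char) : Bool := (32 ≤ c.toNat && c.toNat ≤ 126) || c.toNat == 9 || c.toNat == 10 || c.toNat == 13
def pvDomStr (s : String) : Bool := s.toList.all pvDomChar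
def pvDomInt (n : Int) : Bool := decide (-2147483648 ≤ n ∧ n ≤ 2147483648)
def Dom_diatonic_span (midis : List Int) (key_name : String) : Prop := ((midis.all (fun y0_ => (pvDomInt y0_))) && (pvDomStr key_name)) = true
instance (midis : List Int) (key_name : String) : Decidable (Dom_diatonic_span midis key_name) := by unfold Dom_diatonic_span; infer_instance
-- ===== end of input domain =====

set_option maxRecDepth 8192


-- B replaces A's per-note diatonic-set construction and per-semitone scan by a precomputed
-- scale table per key and a closed-form 7-term floor-division sum (faster).

-- ===== PORT A =====
def NOTE_BASE : PySem.Dict String Int :=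
  PySem.Dict.ofList [("C", 0), ("D", 2), ("E", 4), ("F", 5), ("G", 7), ("A", 9), ("B", 11)]

def KEY_SIGS : PySem.Dict String (PySem.Dict String Int) :=
  PySem.Dict.ofList
    [ ("C", PySem.Dict.ofList []),
      ("G", PySem.Dict.ofList [("F", 1)]),
      ("D", PySem.Dict.ofList [("F", 1), ("C", 1)]),
      ("A", PySem.Dict.ofList [("F", 1), ("C", 1), ("G", 1)]),
      ("E", PySem.Dict.ofList [("F", 1), ("C", 1), ("G", 1), ("D", 1)]),
      ("B", PySem.Dict.ofList [("F", 1), ("C", 1), ("G", 1), ("D", 1), ("A", 1)]),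
      ("F", PySem.Dict.ofList [("B", -1)]),
      ("Bb", PySem.Dict.ofList [("B", -1), ("E", -1)]),
      ("Eb", PySem.Dict.ofList [("B", -1), ("E", -1), ("A", -1)]),
      ("Ab", PySem.Dict.ofList [("B", -1), ("E", -1), ("A", -1), ("D", -1)]),
      ("Db", PySem.Dict.ofList [("B", -1), ("E", -1), ("A", -1), ("D", -1), ("G", -1)]) ]

def diatonic_span (midis : List Int) (key_name : String) : Int :=
  if midis.length < 2 then 0
  else
    match PySem.List.min? midis (fun x => x), PySem.List.max? midis (fun x => x) with
    | some lo, some hi =>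
      let ks := PySem.Dict.getD KEY_SIGS key_name (PySem.Dict.ofList [])
      let pcs := NOTE_BASE.items.foldl
        (fun (s : PySem.Set Int) p =>
          PySem.Set.add s (PySem.Int.mod (p.2 + PySem.Dict.getD ks p.1 0) 12))
        PySem.Set.empty
      (PySem.List.pyRange lo (hi + 1) 1).foldl
        (fun acc m => if PySem.Set.contains pcs (PySem.Int.mod m 12) then acc + 1 else acc) 0
    | _, _ => 0

-- ===== PORT B =====
def SCALE_PCS : PySem.Dict String (List Int) :=
  PySem.Dict.ofList
    [ ("C",  [0, 2, 4, 5, 7, 9, 11]),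
      ("G",  [0, 2, 4, 6, 7, 9, 11]),
      ("D",  [1, 2, 4, 6, 7, 9, 11]),
      ("A",  [1, 2, 4, 6, 8, 9, 11]),
      ("E",  [1, 3, 4, 6, 8, 9, 11]),
      ("B",  [1, 3, 4, 6, 8, 10, 11]),
      ("F",  [0, 2, 4, 5, 7, 9, 10]),
      ("Bb", [0, 2, 3, 5, 7, 9, 10]),
      ("Eb", [0, 2, 3, 5, 7, 8, 10]),
      ("Ab", [0, 1, 3, 5, 7, 8, 10]),
      ("Db", [0, 1, 3, 5, 6, 8, 10]) ]

def diatonic_span_alt (midis : List Int) (key_name : String) : Int :=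
  if midis.length < 2 then 0
  else
    match PySem.List.min? midis (fun x => x) with
    | none => 0
    | some lo =>
      match PySem.List.max? midis (fun x => x) with
      | none => 0
      | some hi =>
        let pcs := PySem.Dict.getD SCALE_PCS key_name (PySem.Dict.getD SCALE_PCS "C" [])
        pcs.foldl
          (fun acc r =>
            acc + (PySem.Int.floordiv (hi - r) 12 - PySem.Int.floordiv (lo - 1 - r) 12)) 0

-- ===== PRECONDITION & SPEC =====
def Spec_diatonic_span (midis : List Int) (key_name : String) (out : Int) : Prop := out = diatonic_span_alt midis key_name
instance (midis : List Int) (key_name : String) (out : Int) : Decidable (Spec_diatonic_span midis key_name out) := by unfold Spec_diatonic_span; infer_instance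

-- ===== CLAIM (what is proved, stated in full; the proofs are below) =====
def Claim_equal_diatonic_span : Prop := ∀ (midis : List Int) (key_name : String), Dom_diatonic_span midis key_name → Spec_diatonic_span midis key_name (diatonic_span midis key_name)

-- ===== LEMMAS AND PROOFS =====

-- #{m in [lo,hi] : m % 12 = r} in closed form, for a residue 0 ≤ r < 12
theorem countSingle : ∀ (n : Nat) (lo hi r : Int), (hi + 1 - lo).toNat = n → lo ≤ hi + 1 →
    0 ≤ r → r < 12 →
    (((PySem.List.pyRange lo (hi + 1) 1).countP (fun m => PySem.Int.mod m 12 == r) : Int)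
      = PySem.Int.floordiv (hi - r) 12 - PySem.Int.floordiv (lo - 1 - r) 12) := by
  intro n
  induction n with
  | zero =>
    intro lo hi r h0 h1 hr0 hr1
    have hlo : lo = hi + 1 := by omega
    subst hlo
    rw [PySem.List.pyRange_one_eq_nil (by omega)]
    simp only [List.countP_nil, Nat.cast_zero]
    have h2 : hi + 1 - 1 - r = hi - r := by ring
    rw [h2]
    omega
  | succ n ih =>
    intro lo hi r h0 h1 hr0 hr1
    have hlt : lo < hi + 1 := by omega
    rw [PySem.List.pyRange_one_cons hlt, List.countP_cons]
    have ih' := ih (lo + 1) hi r (by omega) (by omega) hr0 hr1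
    rw [PySem.Int.floordiv_eq_ediv_of_pos (by norm_num),
        PySem.Int.floordiv_eq_ediv_of_pos (by norm_num)] at ih' ⊢
    have hmd : PySem.Int.mod lo 12 = lo % 12 := PySem.Int.mod_eq_emod_of_pos (by norm_num)
    push_cast
    split_ifs with hcond
    · have hc : lo % 12 = r := by rw [hmd] at hcond; exact beq_iff_eq.mp hcond
      omega
    · have hc : ¬ lo % 12 = r := by
        rw [hmd] at hcond; simpa using hcond
      omega

-- counting a disjunction of disjoint tests splits
theorem countP_or_split (L : List Int) (p q : Int → Bool) (hdisj : ∀ m, ¬(p m = true ∧ q m = true)) :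
    L.countP (fun m => p m || q m) = L.countP p + L.countP q := by
  induction L with
  | nil => simp
  | cons a t ih =>
    by_cases hp : p a = true
    · by_cases hq : q a = true
      · exact absurd ⟨hp, hq⟩ (hdisj a)
      · have hq' : q a = false := by simpa using hq
        simp [ih, hp, hq']
        omega
    · have hp' : p a = false := by simpa using hp
      by_cases hq : q a = true
      · simp [ih, hp', hq]
        omega
      · have hq' : q a = false := by simpa using hq
        simp [ih, hp', hq']

-- decide of cons-membership as a boolean disjunction
theorem decide_mem_cons (x r : Int) (t : List Int) :
    decide (x ∈ r :: t) = ((x == r) || decide (x ∈ t)) := by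
  by_cases h1 : x = r
  · rw [decide_eq_true (List.mem_cons.mpr (Or.inl h1)), beq_iff_eq.mpr h1, Bool.true_or]
  · rw [beq_eq_false_iff_ne.mpr h1, Bool.false_or]
    by_cases h2 : x ∈ t
    · rw [decide_eq_true (List.mem_cons.mpr (Or.inr h2)), decide_eq_true h2]
    · rw [decide_eq_false (fun hm => (List.mem_cons.mp hm).elim h1 h2), decide_eq_false h2]

-- membership in a nodup residue list splits the count into per-residue counts
theorem countMem : ∀ (pcs : List Int), pcs.Nodup → ∀ (L : List Int),
    L.countP (fun m => decide (PySem.Int.mod m 12 ∈ pcs))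
      = (pcs.map (fun r => L.countP (fun m => PySem.Int.mod m 12 == r))).sum := by
  intro pcs
  induction pcs with
  | nil =>
    intro _ L
    rw [List.map_nil, List.sum_nil]
    exact List.countP_eq_zero.mpr (fun m _ => by simp)
  | cons r t ih =>
    intro hnd L
    have hr : r ∉ t := (List.nodup_cons.mp hnd).1
    have ht : t.Nodup := (List.nodup_cons.mp hnd).2
    have hcongr : L.countP (fun m => decide (PySem.Int.mod m 12 ∈ r :: t))
        = L.countP (fun m => (PySem.Int.mod m 12 == r) || decide (PySem.Int.mod m 12 ∈ t)) := by
      apply List.countP_congr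
      intro m _
      rw [decide_mem_cons]
    rw [hcongr, countP_or_split L _ _ (by
      intro m ⟨h1, h2⟩
      simp only [beq_iff_eq] at h1
      simp only [decide_eq_true_eq] at h2
      exact hr (h1 ▸ h2)), ih ht L, List.map_cons, List.sum_cons]

-- the per-residue integer sums agree term by term
theorem sum_closed (lo hi : Int) (hlh : lo ≤ hi) : ∀ (t : List Int), (∀ r ∈ t, 0 ≤ r ∧ r < 12) →
    (t.map (fun r => ((PySem.List.pyRange lo (hi + 1) 1).countP
        (fun m => PySem.Int.mod m 12 == r) : Int))).sum
      = (t.map (fun r => PySem.Int.floordiv (hi - r) 12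
          - PySem.Int.floordiv (lo - 1 - r) 12)).sum := by
  intro t
  induction t with
  | nil => intro _; simp
  | cons r s ih =>
    intro hbd
    have hr := hbd r (by simp)
    simp only [List.map_cons, List.sum_cons]
    rw [countSingle ((hi + 1 - lo).toNat) lo hi r rfl (by omega) hr.1 hr.2,
        ih (fun x hx => hbd x (by simp [hx]))]

-- the main counting identity: A's per-semitone scan over a residue list equals
-- B's closed-form fold over the same list
theorem main_count (pcs : List Int) (hnd : pcs.Nodup) (hbd : ∀ r ∈ pcs, 0 ≤ r ∧ r < 12)
    (lo hi : Int) (hlh : lo ≤ hi) :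
    (PySem.List.pyRange lo (hi + 1) 1).foldl
        (fun acc m => if PySem.Set.contains pcs (PySem.Int.mod m 12) then acc + 1 else acc) (0 : Int)
      = pcs.foldl
          (fun acc r =>
            acc + (PySem.Int.floordiv (hi - r) 12 - PySem.Int.floordiv (lo - 1 - r) 12)) (0 : Int) := by
  rw [PySem.List.foldl_if_add_one, PySem.List.foldl_add]
  simp only [zero_add]
  have hcontains : (PySem.List.pyRange lo (hi + 1) 1).countP
      (fun m => PySem.Set.contains pcs (PySem.Int.mod m 12))
      = (PySem.List.pyRange lo (hi + 1) 1).countP (fun m => decide (PySem.Int.mod m 12 ∈ pcs)) := by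
    apply List.countP_congr
    intro m _
    constructor
    · intro h; simp only [decide_eq_true_eq]
      exact (PySem.Set.contains_iff pcs (PySem.Int.mod m 12)).mp h
    · intro h
      exact (PySem.Set.contains_iff pcs (PySem.Int.mod m 12)).mpr (by simpa using h)
  rw [hcontains, countMem pcs hnd, Nat.cast_list_sum, List.map_map]
  simpa [Function.comp] using sum_closed lo hi hlh pcs hbd

-- A's per-note built residue set equals B's precomputed scale list, for every key_name
theorem pcs_eq (key_name : String) :
    (NOTE_BASE.items.foldl
      (fun (s : PySem.Set Int) p =>
        PySem.Set.add s (PySem.Int.mod (p.2 +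
          PySem.Dict.getD (PySem.Dict.getD KEY_SIGS key_name (PySem.Dict.ofList [])) p.1 0) 12))
      PySem.Set.empty : List Int)
      = PySem.Dict.getD SCALE_PCS key_name (PySem.Dict.getD SCALE_PCS "C" []) := by
  by_cases h1 : key_name = "C";  · subst h1; decide
  by_cases h2 : key_name = "G";  · subst h2; decide
  by_cases h3 : key_name = "D";  · subst h3; decide
  by_cases h4 : key_name = "A";  · subst h4; decide
  by_cases h5 : key_name = "E";  · subst h5; decide
  by_cases h6 : key_name = "B";  · subst h6; decide
  by_cases h7 : key_name = "F";  · subst h7; decide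
  by_cases h8 : key_name = "Bb"; · subst h8; decide
  by_cases h9 : key_name = "Eb"; · subst h9; decide
  by_cases h10 : key_name = "Ab"; · subst h10; decide
  by_cases h11 : key_name = "Db"; · subst h11; decide
  have hA : PySem.Dict.getD KEY_SIGS key_name (PySem.Dict.ofList [])
      = PySem.Dict.ofList [] := by
    simp [KEY_SIGS, PySem.Dict.ofList, PySem.Dict.update, PySem.Dict.getD_insert,
      PySem.Dict.getD_empty, h1, h2, h3, h4, h5, h6, h7, h8, h9, h10, h11]
  have hB : PySem.Dict.getD SCALE_PCS key_name (PySem.Dict.getD SCALE_PCS "C" [])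
      = PySem.Dict.getD SCALE_PCS "C" [] := by
    simp [SCALE_PCS, PySem.Dict.ofList, PySem.Dict.update, PySem.Dict.getD_insert,
      PySem.Dict.getD_empty, h1, h2, h3, h4, h5, h6, h7, h8, h9, h10, h11]
  rw [hA, hB]
  decide

-- the set built by folding add over any list is nodup
theorem nodup_fold_add (f : String × Int → Int) :
    ∀ (l : List (String × Int)) (s : PySem.Set Int), s.Nodup →
    (l.foldl (fun (s : PySem.Set Int) p => PySem.Set.add s (f p)) s).Nodup := by
  intro l
  induction l with
  | nil => intro s hs; exact hs
  | cons a t ih => intro s hs; exact ih _ (PySem.Set.nodup_add _ _ hs)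

-- ===== VERDICT (by name: the statement is the Claim_ definition above) =====
set_option maxHeartbeats 1000000 in
theorem diatonic_span_spec : Claim_equal_diatonic_span := by
  intro midis key_name _
  unfold Spec_diatonic_span diatonic_span diatonic_span_alt
  by_cases hlen : midis.length < 2
  · simp only [hlen, if_true]
  · simp only [hlen, if_false]
    rcases hmin : PySem.List.min? midis (fun x => x) with _ | lo
    · rfl
    rcases hmax : PySem.List.max? midis (fun x => x) with _ | hi
    · rfl
    simp only
    set ks := PySem.Dict.getD KEY_SIGS key_name (PySem.Dict.ofList []) with hks
    set apcs := NOTE_BASE.items.foldl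
        (fun (s : PySem.Set Int) p =>
          PySem.Set.add s (PySem.Int.mod (p.2 + PySem.Dict.getD ks p.1 0) 12))
        PySem.Set.empty with hapcs
    have hnd : apcs.Nodup := nodup_fold_add _ _ _ List.nodup_nil
    have hbd : ∀ r ∈ apcs, 0 ≤ r ∧ r < 12 := by
      intro r hrm
      rw [hapcs] at hrm
      rcases (PySem.Set.mem_foldl_add _ _ _ _).mp hrm with h | ⟨b, _, hb⟩
      · simp [PySem.Set.empty] at h
      · subst hb
        exact ⟨PySem.Int.mod_nonneg _ (by norm_num), PySem.Int.mod_lt _ (by norm_num)⟩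
    have hlohi : lo ≤ hi := by
      have hmem := PySem.List.max?_mem hmax
      exact PySem.List.min?_isMin hmin hi hmem
    have hmc := main_count apcs hnd hbd lo hi hlohi
    rw [hmc]
    have hpe := pcs_eq key_name
    rw [hks] at hapcs
    rw [hapcs, hpe]
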